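-- pv_equiv track=rewrite | github.com/stokuj/sorting-visualization | python/sorting_algorithms.py | heap_gen
-- ===== SOURCE A (Python) =====
-- def heap_gen(arr):
--     arr = arr.copy()
--     n = len(arr)
--
--     def heapify(arr, n, i):
--         largest = i
--         left = 2 * i + 1
--         right = 2 * i + 2
--         if left < n and arr[left] > arr[largest]:
--             largest = left
--         if right < n and arr[right] > arr[largest]:
--             largest = right
--         if largest != i:
--             arr[i], arr[largest] = arr[largest], arr[i]
--             yield arr.copy(), i, largest
--             yield from heapify(arr, n, largest)
--         else:
--             yield arr.copy(), i, largest
--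
--     for i in range(n // 2 - 1, -1, -1):
--         yield from heapify(arr, n, i)
--     for i in range(n-1, 0, -1):
--         arr[0], arr[i] = arr[i], arr[0]
--         yield arr.copy(), 0, i
--         yield from heapify(arr, i, 0)
-- ===== SOURCE B (Python) =====
-- def heap_gen(arr):
--     a = list(arr)
--     n = len(a)
--     out = []
--
--     def pick(m, i):
--         # first-maximal child/parent index; Python's max breaks ties by the
--         # first occurrence, matching "strictly greater replaces" logic
--         return max((j for j in (i, 2 * i + 1, 2 * i + 2) if j < m),
--                    key=lambda j: a[j])
--
--     def sift(m, i):
--         while True: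
--             g = pick(m, i)
--             if g == i:
--                 out.append((a.copy(), i, g))
--                 return
--             a[i], a[g] = a[g], a[i]
--             out.append((a.copy(), i, g))
--             i = g
--
--     i = n // 2 - 1
--     while i >= 0:
--         sift(n, i)
--         i -= 1
--     i = n - 1
--     while i >= 1:
--         a[0], a[i] = a[i], a[0]
--         out.append((a.copy(), 0, i))
--         sift(i, 0)
--         i -= 1
--     yield from out
-- ===== Notes on version B (the rewrite author's own statement) =====
-- stated objective: alternative
-- what changed: A's recursive heapify generator is replaced by countdown while-loops with an iterative sift-down that picks the largest of parent/children via Python's first-maximal max(..., key=...) over the in-range indices, appending snapshots to an output list; same snapshot sequence in the same order.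
import Mathlib
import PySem

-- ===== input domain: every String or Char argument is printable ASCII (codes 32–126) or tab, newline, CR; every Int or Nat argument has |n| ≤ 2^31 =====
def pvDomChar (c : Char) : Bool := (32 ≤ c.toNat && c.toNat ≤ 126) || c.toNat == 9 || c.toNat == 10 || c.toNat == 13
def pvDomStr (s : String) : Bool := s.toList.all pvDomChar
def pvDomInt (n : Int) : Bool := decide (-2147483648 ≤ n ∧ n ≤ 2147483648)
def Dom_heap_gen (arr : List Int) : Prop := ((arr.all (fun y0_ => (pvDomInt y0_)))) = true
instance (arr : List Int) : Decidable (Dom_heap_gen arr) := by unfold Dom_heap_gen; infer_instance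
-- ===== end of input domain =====

-- B replaces A's recursive heapify generator by countdown while-loops with an
-- iterative sift-down whose largest index is Python's first-maximal max();
-- same snapshot sequence, same order ('alternative', not faster).

-- ===== PORT A =====
-- A's heapify child-comparison lines (largest/left/right), extracted so the
-- recursion's termination can cite pickA_cases.
def pickA (arr : List Int) (n i : Nat) : Nat :=
  let l0 := i
  let left := 2 * i + 1
  let right := 2 * i + 2
  let l1 := if left < n && decide (arr.getD left 0 > arr.getD l0 0) then left else l0
  if right < n && decide (arr.getD right 0 > arr.getD l1 0) then right else l1

lemma pickA_cases (arr : List Int) (n i : Nat) :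
    pickA arr n i = i ∨ (i < pickA arr n i ∧ pickA arr n i < n) := by
  simp only [pickA]; split_ifs <;> simp_all <;> omega

-- A's recursive heapify: returns the final array plus the list of yielded snapshots.
def heapifyA (arr : List Int) (n i : Nat) : List Int × List (List Int × Int × Int) :=
  let largest := pickA arr n i
  if _h : largest ≠ i then
    let arr2 := (arr.set i (arr.getD largest 0)).set largest (arr.getD i 0)
    let r := heapifyA arr2 n largest
    (r.1, (arr2, (i : Int), (largest : Int)) :: r.2)
  else (arr, [(arr, (i : Int), (largest : Int))])
termination_by n - i
decreasing_by
  rcases pickA_cases arr n i with h' | h' <;> omega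

def heap_gen (arr : List Int) : List (List Int × Int × Int) :=
  let n := arr.length
  let s1 := ((List.range (n / 2)).reverse).foldl
      (fun st i => ((heapifyA st.1 n i).1, st.2 ++ (heapifyA st.1 n i).2)) (arr, [])
  let s2 := (((List.range (n - 1)).reverse).map (· + 1)).foldl
      (fun st i =>
        let a2 := (st.1.set 0 (st.1.getD i 0)).set i (st.1.getD 0 0)
        ((heapifyA a2 i 0).1, st.2 ++ (a2, (0 : Int), (i : Int)) :: (heapifyA a2 i 0).2)) s1
  s2.2

-- ===== PORT B =====
-- Source B's pick: the candidate indices j in (i, 2i+1, 2i+2) with j < m …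
def kidsB (m i : Nat) : List Nat :=
  [i, 2 * i + 1, 2 * i + 2].filter (fun j => j < m)

-- … and Python's max(…, key=lambda j: a[j]) over them (first maximal).
-- Every call in Source B has i < m, so the list is nonempty; the none arm is
-- unreachable there (Python's max would raise ValueError on an empty one).
def pickB (a : List Int) (m i : Nat) : Nat :=
  (PySem.List.max? (kidsB m i) (fun j => a.getD j 0)).getD i

lemma pickB_cases (a : List Int) (m i : Nat) :
    pickB a m i = i ∨ (i < pickB a m i ∧ pickB a m i < m) := by
  unfold pickB
  rcases hm : PySem.List.max? (kidsB m i) (fun j => a.getD j 0) with _ | g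
  · exact Or.inl rfl
  · have hg := PySem.List.max?_mem hm
    simp only [kidsB, List.mem_filter, List.mem_cons, List.not_mem_nil,
      or_false, decide_eq_true_eq] at hg
    rcases hg with ⟨h1 | h1 | h1, h2⟩ <;> subst h1 <;> simp <;> omega

-- Source B's while-True sift-down loop; out.append(…) is acc ++ [ … ].
def siftB (a : List Int) (m i : Nat) (acc : List (List Int × Int × Int)) :
    List Int × List (List Int × Int × Int) :=
  if _h : pickB a m i = i then (a, acc ++ [(a, (i : Int), (i : Int))])
  else
    siftB ((a.set i (a.getD (pickB a m i) 0)).set (pickB a m i) (a.getD i 0)) m (pickB a m i)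
      (acc ++ [((a.set i (a.getD (pickB a m i) 0)).set (pickB a m i) (a.getD i 0),
        (i : Int), (pickB a m i : Int))])
termination_by m - i
decreasing_by
  rcases pickB_cases a m i with h' | h' <;> omega

-- Source B's first while loop (i counts down from n//2 - 1 to 0).
def phase1B (n : Nat) : Nat → List Int × List (List Int × Int × Int) →
    List Int × List (List Int × Int × Int)
  | 0, st => st
  | k + 1, st => phase1B n k (siftB st.1 n k st.2)

-- Source B's second while loop (i counts down from n - 1 to 1).
def phase2B : Nat → List Int × List (List Int × Int × Int) →
    List Int × List (List Int × Int × Int)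
  | 0, st => st
  | k + 1, st =>
      let i := k + 1
      let a2 := (st.1.set 0 (st.1.getD i 0)).set i (st.1.getD 0 0)
      phase2B k (siftB a2 i 0 (st.2 ++ [(a2, (0 : Int), (i : Int))]))

def heap_gen_alt (arr : List Int) : List (List Int × Int × Int) :=
  let n := arr.length
  (phase2B (n - 1) (phase1B n (n / 2) (arr, []))).2

-- ===== PRECONDITION & SPEC =====
def Spec_heap_gen (arr : List Int) (out : List (List Int × Int × Int)) : Prop := out = heap_gen_alt arr
instance (arr : List Int) (out : List (List Int × Int × Int)) : Decidable (Spec_heap_gen arr out) := by unfold Spec_heap_gen; infer_instance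

-- ===== CLAIM (what is proved, stated in full; the proofs are below) =====
def Claim_equal_heap_gen : Prop := ∀ (arr : List Int), Dom_heap_gen arr → Spec_heap_gen arr (heap_gen arr)

-- ===== LEMMAS AND PROOFS =====

-- B's first-maximal max over the valid candidates is A's two strict comparisons.
lemma pick_eq (a : List Int) (m i : Nat) (hi : i < m) :
    pickB a m i = pickA a m i := by
  have hlr : 2 * i + 2 < m → 2 * i + 1 < m := by omega
  by_cases hr : 2 * i + 2 < m
  · have hl := hlr hr
    simp only [pickB, pickA, kidsB, List.filter, hi, hl, hr, decide_true,
      PySem.List.max?, List.foldl]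
    split_ifs <;> simp_all <;> (try split_ifs <;> simp_all) <;> omega
  · by_cases hl : 2 * i + 1 < m
    · simp only [pickB, pickA, kidsB, List.filter, hi, hl, hr, decide_true,
        decide_false, PySem.List.max?, List.foldl]
      split_ifs <;> simp_all <;> omega
    · simp only [pickB, pickA, kidsB, List.filter, hi, hl, hr, decide_true,
        decide_false, PySem.List.max?, List.foldl]
      split_ifs <;> simp_all

-- B's iterative sift equals A's recursive heapify, snapshots appended in order.
lemma sift_eq (a : List Int) (m i : Nat) (acc : List (List Int × Int × Int))
    (hi : i < m) :
    siftB a m i acc = ((heapifyA a m i).1, acc ++ (heapifyA a m i).2) := by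
  fun_induction siftB a m i acc with
  | case1 a i acc h =>
      have hp : pickA a m i = i := by rw [← pick_eq a m i hi]; exact h
      rw [heapifyA, dif_neg (by simp [hp])]
      simp [hp]
  | case2 a i acc h ih =>
      have hpe : pickB a m i = pickA a m i := pick_eq a m i hi
      have hp : pickA a m i ≠ i := by rw [← hpe]; exact h
      have hg : i < pickB a m i ∧ pickB a m i < m := by
        rcases pickB_cases a m i with h' | h' <;> [exact absurd h' h; exact h']
      rw [heapifyA, dif_pos hp, ih hg.2, ← hpe]
      simp

lemma phase1_eq (n : Nat) :
    ∀ (k : Nat) (st : List Int × List (List Int × Int × Int)), k ≤ n →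
      phase1B n k st = ((List.range k).reverse).foldl
        (fun st i => ((heapifyA st.1 n i).1, st.2 ++ (heapifyA st.1 n i).2)) st
  | 0, st, _ => rfl
  | k + 1, st, hk => by
      rw [phase1B, List.range_succ, List.reverse_append, List.reverse_singleton,
        List.singleton_append, List.foldl_cons,
        sift_eq st.1 n k st.2 (by omega), phase1_eq n k _ (by omega)]

lemma phase2_eq :
    ∀ (k : Nat) (st : List Int × List (List Int × Int × Int)),
      phase2B k st = (((List.range k).reverse).map (· + 1)).foldl
        (fun st i =>
          let a2 := (st.1.set 0 (st.1.getD i 0)).set i (st.1.getD 0 0)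
          ((heapifyA a2 i 0).1, st.2 ++ (a2, (0 : Int), (i : Int)) :: (heapifyA a2 i 0).2)) st
  | 0, st => rfl
  | k + 1, st => by
      rw [phase2B, List.range_succ, List.reverse_append, List.reverse_singleton,
        List.singleton_append, List.map_cons, List.foldl_cons,
        sift_eq _ (k + 1) 0 _ (by omega), phase2_eq k]
      simp

-- ===== VERDICT (by name: the statement is the Claim_ definition above) =====
theorem heap_gen_spec : Claim_equal_heap_gen := by
  intro arr _
  unfold Spec_heap_gen heap_gen heap_gen_alt
  dsimp only
  rw [phase1_eq arr.length (arr.length / 2) _ (Nat.div_le_self _ _),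
    phase2_eq (arr.length - 1)]
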